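-- pv_equiv track=rewrite | github.com/ncs-pl/foobar | numbers-station-coded-messages/n1c00o/solution.py | solution
-- ===== SOURCE A (Python) =====
-- def solution(l, t):
--     for start_i in range(len(l)):
--         sum = 0
--
--         for curr_i in range(start_i, len(l)):
--             sum += l[curr_i]
--
--             if sum == t:
--                 return [start_i, curr_i]
--
--     return [-1, -1]
-- ===== SOURCE B (Python) =====
-- def _first_ge(js, key):
--     # smallest element of ascending list js that is >= key, or None
--     lo, hi = 0, len(js)
--     while lo < hi:
--         mid = (lo + hi) // 2
--         if js[mid] < key:
--             lo = mid + 1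
--         else:
--             hi = mid
--     return js[lo] if lo < len(js) else None
--
--
-- def solution(l, t):
--     # prefix sums + map prefix-value -> ascending end positions, binary search per start
--     idx = {}
--     acc = 0
--     j = 0
--     for x in l:
--         acc += x
--         j += 1
--         idx[acc] = idx.get(acc, []) + [j]
--     ps = 0
--     s = 0
--     for x in l:
--         r = _first_ge(idx.get(ps + t, []), s + 1)
--         if r is not None:
--             return [s, r - 1]
--         ps += x
--         s += 1
--     return [-1, -1]
-- ===== Notes on version B (the rewrite author's own statement) =====
-- stated objective: faster
-- what changed: Replaces the quadratic start/end double loop by one pass building prefix sums and a dict from prefix value to its ascending positions, then a binary search per start for the earliest matching end.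
import Mathlib
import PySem

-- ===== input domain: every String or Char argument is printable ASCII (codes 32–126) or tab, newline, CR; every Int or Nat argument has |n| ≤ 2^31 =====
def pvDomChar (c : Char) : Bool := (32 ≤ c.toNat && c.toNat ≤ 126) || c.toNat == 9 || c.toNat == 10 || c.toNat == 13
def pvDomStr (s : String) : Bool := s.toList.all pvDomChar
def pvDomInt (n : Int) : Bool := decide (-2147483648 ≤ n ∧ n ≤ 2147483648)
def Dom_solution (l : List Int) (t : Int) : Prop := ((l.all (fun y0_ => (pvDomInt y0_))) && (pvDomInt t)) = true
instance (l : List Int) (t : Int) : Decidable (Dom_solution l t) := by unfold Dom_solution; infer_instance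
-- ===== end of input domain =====

-- B replaces A's quadratic start/end double loop by prefix sums, a dict from prefix value
-- to its ascending positions, and one binary search per start (objective: faster).

-- ===== PORT A =====
-- inner loop: `for curr_i in range(start_i, len(l)): sum += l[curr_i]; if sum == t: return …`
def solInner (l : List Int) (t : Int) (sum : Int) (curr : Nat) : Option Nat :=
  if h : curr < l.length then
    if sum + l[curr] = t then some curr
    else solInner l t (sum + l[curr]) (curr + 1)
  else none
termination_by l.length - curr

-- outer loop: `for start_i in range(len(l)): …` with early return
def solOuter (l : List Int) (t : Int) (s : Nat) : List Int :=
  if s < l.length then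
    match solInner l t 0 s with
    | some e => [(s : Int), (e : Int)]
    | none => solOuter l t (s + 1)
  else [-1, -1]
termination_by l.length - s

def solution (l : List Int) (t : Int) : List Int := solOuter l t 0

-- ===== PORT B =====
-- `_first_ge`: binary search for the first element ≥ key in ascending js
def firstGe (js : List Int) (lo hi : Nat) (key : Int) : Option Int :=
  if _h : lo < hi then
    let mid := (lo + hi) / 2
    if js.getD mid 0 < key then firstGe js (mid + 1) hi key
    else firstGe js lo mid key
  else if lo < js.length then some (js.getD lo 0) else none
termination_by hi - lo
decreasing_by all_goals omega

-- first loop of Source B: `acc += x; j += 1; idx[acc] = idx.get(acc, []) + [j]`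
-- (`idx[acc] = idx.get(acc, []) + [j]` is exactly Dict.modify acc [] (· ++ [j]))
def buildIdx (xs : List Int) (acc : Int) (j : Int) (d : PySem.Dict Int (List Int)) :
    PySem.Dict Int (List Int) :=
  match xs with
  | [] => d
  | x :: rest => buildIdx rest (acc + x) (j + 1) (d.modify (acc + x) [] (· ++ [j + 1]))

-- second loop of Source B: per start s, look up ps+t and binary-search for first position ≥ s+1
def searchB (idx : PySem.Dict Int (List Int)) (t : Int) (rem : List Int) (ps : Int) (s : Int) :
    List Int :=
  match rem with
  | [] => [-1, -1]
  | x :: rest =>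
    let js := idx.getD (ps + t) []
    match firstGe js 0 js.length (s + 1) with
    | some r => [s, r - 1]
    | none => searchB idx t rest (ps + x) (s + 1)

def solution_alt (l : List Int) (t : Int) : List Int :=
  searchB (buildIdx l 0 0 PySem.Dict.empty) t l 0 0

-- ===== PRECONDITION & SPEC =====
def Spec_solution (l : List Int) (t : Int) (out : List Int) : Prop := out = solution_alt l t
instance (l : List Int) (t : Int) (out : List Int) : Decidable (Spec_solution l t out) := by unfold Spec_solution; infer_instance

-- ===== CLAIM (what is proved, stated in full; the proofs are below) =====
def Claim_equal_solution : Prop := ∀ (l : List Int) (t : Int), Dom_solution l t → Spec_solution l t (solution l t)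

-- ===== LEMMAS AND PROOFS =====

-- the (prefix value, position) pairs produced by Source B's first loop
def pvPairs (xs : List Int) (acc j : Int) : List (Int × Int) :=
  match xs with
  | [] => []
  | x :: rest => (acc + x, j + 1) :: pvPairs rest (acc + x) (j + 1)

theorem buildIdx_getD (xs : List Int) (v : Int) :
    ∀ (acc j : Int) (d : PySem.Dict Int (List Int)),
      (buildIdx xs acc j d).getD v [] =
        d.getD v [] ++ ((pvPairs xs acc j).filter (fun p => p.1 == v)).map (·.2) := by
  induction xs with
  | nil => intro acc j d; simp [buildIdx, pvPairs]
  | cons x rest ih =>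
    intro acc j d
    rw [buildIdx, ih]
    rw [PySem.Dict.getD_modify]
    by_cases h : acc + x = v
    · simp [pvPairs, List.filter_cons, h]
    · have : ¬ v = acc + x := fun hh => h hh.symm
      simp [pvPairs, List.filter_cons, h, this]

theorem pvPairs_eq (xs : List Int) :
    ∀ (acc j : Int), pvPairs xs acc j =
      (List.range xs.length).map
        (fun e => (acc + ((xs.take (e + 1)).sum), j + 1 + (e : Int))) := by
  induction xs with
  | nil => intro acc j; simp [pvPairs]
  | cons x rest ih =>
    intro acc j
    rw [pvPairs, ih]
    simp only [List.length_cons, List.range_succ_eq_map, List.map_cons, List.map_map]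
    congr 1
    · simp
    apply List.map_congr_left
    intro e _
    simp only [Function.comp_apply, Nat.succ_eq_add_one, List.take_succ_cons, List.sum_cons,
      Nat.cast_add, Nat.cast_one]
    refine Prod.ext ?_ ?_ <;> simp <;> ring

theorem buildIdx_getD' (l : List Int) (v : Int) :
    (buildIdx l 0 0 PySem.Dict.empty).getD v [] =
      ((List.range l.length).filter (fun e => decide ((l.take (e+1)).sum = v))).map
        (fun e : Nat => (e : Int) + 1) := by
  rw [buildIdx_getD, pvPairs_eq, PySem.Dict.getD_empty, List.nil_append, List.filter_map,
    List.map_map]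
  have hf : ((fun p : Int × Int => p.1 == v) ∘
      (fun e : Nat => ((0 : Int) + ((l.take (e + 1)).sum), (0 : Int) + 1 + (e : Int)))) =
      (fun e : Nat => decide ((l.take (e+1)).sum = v)) := by
    funext e
    simp only [Function.comp_apply, zero_add]
    cases h : decide ((List.take (e + 1) l).sum = v) <;> simp_all
  rw [hf]
  apply List.map_congr_left
  intro e _
  simp
  ring

theorem find?_map' {α β : Type} (f : α → β) (p : β → Bool) (xs : List α) :
    (xs.map f).find? p = (xs.find? (fun x => p (f x))).map f := by
  induction xs with
  | nil => rfl
  | cons x rest ih =>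
    simp only [List.map_cons, List.find?_cons]
    by_cases h : p (f x) <;> simp [h, ih]

theorem find?_filter' {α : Type} (q p : α → Bool) (xs : List α) :
    (xs.filter q).find? p = xs.find? (fun x => q x && p x) := by
  induction xs with
  | nil => rfl
  | cons x rest ih =>
    by_cases hq : q x
    · by_cases hp : p x <;> simp [List.filter_cons, hq, hp, List.find?_cons, ih]
    · simp [List.filter_cons, hq, List.find?_cons, ih]

theorem find?_congr' {α : Type} (p q : α → Bool) (xs : List α)
    (h : ∀ x ∈ xs, p x = q x) : xs.find? p = xs.find? q := by
  induction xs with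
  | nil => rfl
  | cons x rest ih =>
    have hx := h x (by simp)
    by_cases hp : p x
    · simp [List.find?_cons, hp, hx ▸ hp]
    · have : q x = false := by rw [← hx]; simpa using hp
      simp [List.find?_cons, hp, this, ih (fun y hy => h y (by simp [hy]))]

theorem find?_eq_getElem? {α : Type} (p : α → Bool) (xs : List α) :
    ∀ (lo : Nat), (∀ i (hi : i < xs.length), i < lo → p xs[i] = false) →
      (∀ i (hi : i < xs.length), lo ≤ i → p xs[i] = true) →
      xs.find? p = xs[lo]? := by
  induction xs with
  | nil => intro lo _ _; simp
  | cons x rest ih =>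
    intro lo h1 h2
    match lo with
    | 0 =>
      have := h2 0 (by simp) (by omega)
      simp at this
      simp [List.find?_cons, this]
    | lo' + 1 =>
      have hx := h1 0 (by simp) (by omega)
      simp at hx
      simp only [List.find?_cons, hx, Bool.false_eq_true, if_neg, List.getElem?_cons_succ]
      rw [ih lo' (fun i hi h => h1 (i+1) (by simpa using hi) (by omega))
            (fun i hi h => h2 (i+1) (by simpa using hi) (by omega))]

theorem firstGe_spec (js : List Int) (hs : List.Pairwise (· < ·) js) (key : Int) :
    ∀ (fuel lo hi : Nat), hi - lo ≤ fuel → lo ≤ hi → hi ≤ js.length →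
      (∀ i (h : i < js.length), i < lo → js[i] < key) →
      (∀ i (h : i < js.length), hi ≤ i → key ≤ js[i]) →
      firstGe js lo hi key = js.find? (fun x => key ≤ x) := by
  have mono := List.pairwise_iff_getElem.mp hs
  intro fuel
  induction fuel with
  | zero =>
    intro lo hi hf hle hlen h1 h2
    have : lo = hi := by omega
    subst this
    rw [firstGe]
    simp only [lt_irrefl, dif_neg, not_lt]
    rw [find?_eq_getElem? _ _ lo (fun i hi h => by simpa using h1 i hi h)
        (fun i hi h => by simpa using h2 i hi h)]
    by_cases h : lo < js.length
    · simp [h, List.getElem?_eq_getElem h, List.getD_eq_getElem?_getD, if_pos h]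
    · simp [h, List.getElem?_eq_none (by omega : js.length ≤ lo)]
  | succ n ih =>
    intro lo hi hf hle hlen h1 h2
    by_cases hlt : lo < hi
    · rw [firstGe]
      simp only [hlt, dif_pos]
      have hmid : (lo + hi) / 2 < js.length := by omega
      have hgd : js.getD ((lo + hi) / 2) 0 = js[(lo + hi) / 2] := by
        simp [List.getD_eq_getElem?_getD, List.getElem?_eq_getElem hmid]
      rw [hgd]
      by_cases hc : js[(lo + hi) / 2] < key
      · simp only [hc, if_pos]
        apply ih ((lo+hi)/2 + 1) hi (by omega) (by omega) hlen
        · intro i h hi2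
          rcases Nat.lt_or_ge i ((lo+hi)/2) with hi3 | hi3
          · exact lt_trans (mono i ((lo+hi)/2) h hmid hi3) hc
          · have : i = (lo+hi)/2 := by omega
            subst this; exact hc
        · exact h2
      · simp only [hc, if_neg]
        apply ih lo ((lo+hi)/2) (by omega) (by omega) (by omega) h1
        intro i h hi2
        rw [Int.not_lt] at hc
        rcases Nat.lt_or_ge ((lo+hi)/2) i with hi3 | hi3
        · exact le_of_lt (lt_of_le_of_lt hc (mono ((lo+hi)/2) i hmid h hi3))
        · have : i = (lo+hi)/2 := by omega
          subst this; exact hc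
    · have : lo = hi := by omega
      subst this
      rw [firstGe]
      simp only [lt_irrefl, dif_neg, not_lt]
      rw [find?_eq_getElem? _ _ lo (fun i hi h => by simpa using h1 i hi h)
          (fun i hi h => by simpa using h2 i hi h)]
      by_cases h : lo < js.length
      · simp [h, List.getElem?_eq_getElem h, List.getD_eq_getElem?_getD, if_pos h]
      · simp [h, List.getElem?_eq_none (by omega : js.length ≤ lo)]

theorem solInner_eq (l : List Int) (t : Int) :
    ∀ (fuel curr : Nat) (sum : Int), l.length - curr ≤ fuel →
      solInner l t sum curr =
        (List.range' curr (l.length - curr)).find?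
          (fun e => decide (sum + (((l.take (e + 1)).sum) - ((l.take curr).sum)) = t)) := by
  intro fuel
  induction fuel with
  | zero =>
    intro curr sum hf
    have h1 : ¬ curr < l.length := by omega
    have h2 : l.length - curr = 0 := by omega
    rw [solInner]
    simp [h1, h2]
  | succ n ih =>
    intro curr sum hf
    by_cases h : curr < l.length
    · rw [solInner]
      simp only [h, dif_pos]
      have hrange : List.range' curr (l.length - curr) = curr :: List.range' (curr+1) (l.length - (curr+1)) := by
        have : l.length - curr = (l.length - (curr+1)) + 1 := by omega
        rw [this, List.range'_succ]
      rw [hrange, List.find?_cons]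
      have hsucc : (l.take (curr + 1)).sum = (l.take curr).sum + l[curr] := by
        rw [List.sum_take_succ]
      by_cases hc : sum + l[curr] = t
      · have : decide (sum + ((l.take (curr + 1)).sum - (l.take curr).sum) = t) = true := by
          simp [hsucc]; omega
        simp [hc, this]
      · have hd : decide (sum + ((l.take (curr + 1)).sum - (l.take curr).sum) = t) = false := by
          simp [hsucc]; omega
        simp only [hc, if_neg, hd, Bool.false_eq_true, if_false]
        rw [ih (curr+1) (sum + l[curr]) (by omega)]
        apply find?_congr'
        intro e _
        have : sum + l[curr] + ((l.take (e + 1)).sum - (l.take (curr+1)).sum)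
             = sum + ((l.take (e + 1)).sum - (l.take curr).sum) := by rw [hsucc]; ring
        simp [this]
    · rw [solInner]
      have h2 : l.length - curr = 0 := by omega
      simp [h, h2]

theorem perStart (l : List Int) (t : Int) (s : Nat) (hs : s ≤ l.length) :
    (let js := (buildIdx l 0 0 PySem.Dict.empty).getD ((l.take s).sum + t) []
     firstGe js 0 js.length ((s : Int) + 1)) =
      (solInner l t 0 s).map (fun e : Nat => (e : Int) + 1) := by
  set v := (l.take s).sum + t with hv
  set m := (List.range l.length).filter (fun e => decide ((l.take (e+1)).sum = v)) with hm
  have hjs : (buildIdx l 0 0 PySem.Dict.empty).getD v [] = m.map (fun e : Nat => (e : Int) + 1) :=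
    buildIdx_getD' l v
  simp only [hjs]
  have hpw : List.Pairwise (· < ·) (m.map (fun e : Nat => (e : Int) + 1)) := by
    apply List.Pairwise.map _ (fun a b (h : a < b) => by omega)
    exact (List.pairwise_lt_range).filter _
  rw [firstGe_spec _ hpw ((s : Int) + 1) (List.map (fun e : Nat => (e : Int) + 1) m).length 0
      (List.map (fun e : Nat => (e : Int) + 1) m).length (by omega) (by omega) (le_refl _)
      (fun i h hi => by omega) (fun i h hi => by omega)]
  rw [find?_map', hm, find?_filter']
  rw [solInner_eq l t l.length s 0 (by omega)]
  have hsplit : List.range l.length =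
      List.range' 0 (s) ++ List.range' (s) (l.length - s) := by
    rw [List.range_eq_range']
    have heq := @List.range'_append 0 (s) (l.length - s) 1
    simp only [Nat.one_mul, Nat.zero_add] at heq
    have hA : s + (l.length - s) = l.length := by omega
    conv_lhs => rw [← hA]
    exact heq.symm
  rw [hsplit, List.find?_append]
  have hnone : (List.range' 0 (s)).find?
      (fun e => decide ((l.take (e+1)).sum = v) && decide ((s:Int) + 1 ≤ (e:Int) + 1)) = none := by
    rw [List.find?_eq_none]
    intro e he
    obtain ⟨i, hi1, hi2⟩ := List.mem_range'.mp he
    have : e < s := by omega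
    simp only [Bool.and_eq_true, decide_eq_true_eq]
    rintro ⟨-, h2⟩
    omega
  rw [hnone, Option.none_or]
  have hcongr : (List.range' (s) (l.length - s)).find?
      (fun e => decide ((l.take (e+1)).sum = v) && decide ((s:Int) + 1 ≤ (e:Int) + 1)) =
      (List.range' (s) (l.length - s)).find?
      (fun e => decide (0 + (((l.take (e + 1)).sum) - ((l.take (s)).sum)) = t)) := by
    apply find?_congr'
    intro e he
    obtain ⟨i, hi1, hi2⟩ := List.mem_range'.mp he
    have hes : s ≤ e := by omega
    have helen : e < l.length := by omega
    by_cases hse : s ≤ e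
    · have h2 : decide ((s:Int) + 1 ≤ (e:Int) + 1) = true := by
        simp only [decide_eq_true_eq]
        omega
      rw [h2, Bool.and_true]
      rw [hv]
      simp only [decide_eq_decide]
      omega
    · omega
  rw [hcongr]

theorem searchB_eq (l : List Int) (t : Int) :
    ∀ (rem : List Int) (s : Nat), rem = l.drop s →
      searchB (buildIdx l 0 0 PySem.Dict.empty) t rem ((l.take s).sum) (s : Int) =
        solOuter l t s := by
  intro rem
  induction rem with
  | nil =>
    intro s hdrop
    have hs : l.length ≤ s := by
      by_contra h
      have := List.drop_eq_nil_iff.mp hdrop.symm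
      omega
    rw [searchB, solOuter]
    simp [Nat.not_lt.mpr hs]
  | cons x rest ih =>
    intro s hdrop
    have hs : s < l.length := by
      by_contra h
      rw [List.drop_eq_nil_of_le (by omega)] at hdrop
      simp at hdrop
    have hx : x = l[s] := by
      have h0 : (l.drop s).head? = some x := by rw [← hdrop]; rfl
      rw [List.head?_drop] at h0
      rw [List.getElem?_eq_getElem hs] at h0
      simpa using h0.symm
    have hrest : rest = l.drop (s + 1) := by
      have hh : (l.drop s).tail = l.drop (s+1) := List.tail_drop
      rw [← hh, ← hdrop, List.tail_cons]
    rw [searchB, solOuter]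
    simp only [hs, if_pos]
    have hps := perStart l t s (le_of_lt hs)
    simp only at hps
    rw [hps]
    cases hsi : solInner l t 0 s with
    | some e =>
      simp only [Option.map_some]
      norm_num
    | none =>
      simp only [Option.map_none]
      have : (l.take s).sum + x = (l.take (s+1)).sum := by
        rw [hx, List.sum_take_succ]
      rw [this]
      have : ((s : Int) + 1) = ((s + 1 : Nat) : Int) := by push_cast; ring
      rw [this]
      exact ih (s+1) hrest

-- ===== VERDICT (by name: the statement is the Claim_ definition above) =====
theorem solution_spec : Claim_equal_solution := by
  intro l t _
  unfold Spec_solution solution solution_alt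
  exact (searchB_eq l t l 0 (by simp)).symm
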